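-- pv_equiv track=rewrite | github.com/owYuriGG/Python-Web-Scrapping | extract_module.py | get_game_data
-- ===== SOURCE A (Python) =====
-- def get_game_data(linhas, game, i):
--     gravar = True
--     for j in linhas[i+7]:
--         if j == '<':
--             gravar = False
--         if j != '' and j != ' ' and gravar:
--             game['lancamento'] = game['lancamento'] + j
--     return game
-- ===== SOURCE B (Python) =====
-- def get_game_data(linhas, game, i):
--     text = linhas[i + 7].split('<')[0].replace(' ', '')
--     if text:
--         game['lancamento'] = game['lancamento'] + text
--     return game
-- ===== Notes on version B (the rewrite author's own statement) =====
-- stated objective: idiomatic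
-- what changed: The character loop with the 'gravar' boolean flag and per-character dict re-assignment is replaced by two string operations (split('<')[0] to take the prefix before the first '<', replace(' ','') to drop spaces) and a single guarded dict update.
import Mathlib
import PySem

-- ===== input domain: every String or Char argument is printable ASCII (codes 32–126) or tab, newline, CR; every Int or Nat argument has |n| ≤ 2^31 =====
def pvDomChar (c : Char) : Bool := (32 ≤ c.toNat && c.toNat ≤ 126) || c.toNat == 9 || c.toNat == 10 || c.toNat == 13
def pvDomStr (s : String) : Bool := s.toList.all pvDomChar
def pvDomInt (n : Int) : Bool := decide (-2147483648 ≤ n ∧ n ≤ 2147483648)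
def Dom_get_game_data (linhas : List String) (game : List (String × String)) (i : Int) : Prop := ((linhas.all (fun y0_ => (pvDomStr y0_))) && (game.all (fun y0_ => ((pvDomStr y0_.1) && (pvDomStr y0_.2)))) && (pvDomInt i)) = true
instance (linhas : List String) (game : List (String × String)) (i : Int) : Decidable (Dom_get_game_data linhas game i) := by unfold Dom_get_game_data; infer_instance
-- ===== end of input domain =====

-- B replaces A's character loop + 'gravar' flag by split('<')[0].replace(' ','') and one guarded
-- dict update (idiomatic; same cost).  Both Pythons mutate 'game' in place identically; the
-- equivalence proved here is about the returned dict.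

-- ===== PORT A =====
-- loop body of A: 'for j in linhas[i+7]: if j == '<': gravar = False; if j != '' and j != ' ' and gravar: game['lancamento'] += j'
-- (the test j != '' is always true for a character and is dropped; the read game['lancamento'] is
-- ported with getD "" — the KeyError case is excluded by Pre_)
def stepA (st : Bool × PySem.Dict String String) (j : Char) : Bool × PySem.Dict String String :=
  let gravar := if j = '<' then false else st.1
  if j ≠ ' ' ∧ gravar = true then
    (gravar, st.2.insert "lancamento" (st.2.getD "lancamento" "" ++ String.ofList [j]))
  else (gravar, st.2)

def get_game_data (linhas : List String) (game : List (String × String)) (i : Int) : List (String × String) :=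
  match PySem.List.pyGet? linhas (i + 7) with
  | none => game            -- IndexError in Python; excluded by Pre_
  | some line => (line.toList.foldl stepA (true, PySem.Dict.mk game)).2.items

-- ===== PORT B =====
def get_game_data_alt (linhas : List String) (game : List (String × String)) (i : Int) : List (String × String) :=
  match PySem.List.pyGet? linhas (i + 7) with
  | none => game            -- IndexError in Python; excluded by Pre_
  | some line =>
    let parts := (PySem.Str.split? line "<").getD []        -- sep ≠ "", so split? is always some
    let text := PySem.Str.replace ((PySem.List.pyGet? parts 0).getD "") " " ""   -- split returns ≥ 1 part
    if text = "" then game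
    else ((PySem.Dict.mk game).insert "lancamento"
            ((PySem.Dict.mk game).getD "lancamento" "" ++ text)).items

-- ===== PRECONDITION & SPEC =====
-- Pre_ excludes exactly the inputs on which A raises: i+7 out of range for linhas (IndexError),
-- and the KeyError inputs, where the written-to key is missing from game although a non-space
-- character precedes the first '<' of the selected line.
def Pre_get_game_data (linhas : List String) (game : List (String × String)) (i : Int) : Prop :=
  (PySem.List.pyGet? linhas (i + 7)).isSome = true ∧
  ("lancamento" ∈ game.map Prod.fst ∨
    (((PySem.List.pyGet? linhas (i + 7)).getD "").toList.takeWhile (· ≠ '<')).filter (· ≠ ' ') = [])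
instance (linhas : List String) (game : List (String × String)) (i : Int) : Decidable (Pre_get_game_data linhas game i) := by unfold Pre_get_game_data; infer_instance

def pvWitness_get_game_data : List String × (List (String × String)) × Int :=
  (["<html>", " a b<c"], [("lancamento", "20")], -6)

def Spec_get_game_data (linhas : List String) (game : List (String × String)) (i : Int) (out : List (String × String)) : Prop := out = get_game_data_alt linhas game i
instance (linhas : List String) (game : List (String × String)) (i : Int) (out : List (String × String)) : Decidable (Spec_get_game_data linhas game i out) := by unfold Spec_get_game_data; infer_instance

-- ===== CLAIM (what is proved, stated in full; the proofs are below) =====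
def Claim_equal_get_game_data : Prop := ∀ (linhas : List String) (game : List (String × String)) (i : Int), Dom_get_game_data linhas game i → Pre_get_game_data linhas game i → Spec_get_game_data linhas game i (get_game_data linhas game i)

-- ===== LEMMAS AND PROOFS =====

-- once gravar is False, A's loop changes nothing
theorem foldl_stepA_false (l : List Char) (g : PySem.Dict String String) :
    l.foldl stepA (false, g) = (false, g) := by
  induction l with
  | nil => rfl
  | cons c t ih => simp [stepA]; exact ih

-- appending the characters cs one by one to game["lancamento"] = appending the string of cs once
def applyChars (cs : List Char) (g : PySem.Dict String String) : PySem.Dict String String :=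
  cs.foldl (fun g c => g.insert "lancamento" (g.getD "lancamento" "" ++ String.ofList [c])) g

theorem applyChars_eq (cs : List Char) (g : PySem.Dict String String) :
    applyChars cs g =
      if cs = [] then g
      else g.insert "lancamento" (g.getD "lancamento" "" ++ String.ofList cs) := by
  induction cs generalizing g with
  | nil => rfl
  | cons c t ih =>
    simp only [applyChars, List.foldl_cons] at *
    rw [ih]
    by_cases ht : t = []
    · simp [ht]
    · simp only [ht, reduceCtorEq, if_false]
      rw [PySem.Dict.getD_insert_self, PySem.Dict.insert_insert_self,
          String.append_assoc, ← String.ofList_append]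
      rfl

-- closed form of A's loop from the initial state (True, g)
theorem foldl_stepA_true (l : List Char) (g : PySem.Dict String String) :
    (l.foldl stepA (true, g)).2 = applyChars ((l.takeWhile (· ≠ '<')).filter (· ≠ ' ')) g := by
  induction l generalizing g with
  | nil => rfl
  | cons c t ih =>
    by_cases hc : c = '<'
    · subst hc
      simp [stepA, foldl_stepA_false, applyChars]
    · by_cases hs : c = ' '
      · subst hs
        simpa [stepA, List.takeWhile_cons, hc] using ih g
      · have hstep : stepA (true, g) c =
            (true, g.insert "lancamento" (g.getD "lancamento" "" ++ String.ofList [c])) := by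
          simp [stepA, hc, hs]
        rw [List.foldl_cons, hstep, ih]
        have h1 : (c :: t).takeWhile (· ≠ '<') = c :: t.takeWhile (· ≠ '<') := by
          simp [hc]
        have h2 : (c :: t.takeWhile (· ≠ '<')).filter (· ≠ ' ')
            = c :: (t.takeWhile (· ≠ '<')).filter (· ≠ ' ') := by simp [hs]
        rw [h1, h2]
        rfl

-- unfold lemmas for the fuelled helpers of PySem.Chars.replace / splitOn (single-char pattern)
theorem replace_go_nil (n : Nat) (acc : List Char) :
    PySem.Chars.replace.go [' '] [] (n+1) [] acc = acc.reverse := by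
  simp [PySem.Chars.replace.go]

theorem replace_go_cons (n : Nat) (c : Char) (t acc : List Char) :
    PySem.Chars.replace.go [' '] [] (n+1) (c :: t) acc =
      if c = ' ' then PySem.Chars.replace.go [' '] [] n t acc
      else PySem.Chars.replace.go [' '] [] n t (c :: acc) := by
  simp only [PySem.Chars.replace.go, List.isPrefixOf_cons₂, List.isPrefixOf_nil_left,
    Bool.and_true, beq_iff_eq, List.length_cons, List.length_nil, Nat.zero_add, List.drop_one,
    List.tail_cons, List.reverse_nil, List.nil_append]
  by_cases hc : c = ' ' <;> simp [hc, eq_comm]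

theorem splitOn_go_nil (n : Nat) (cur : List Char) (acc : List (List Char)) :
    PySem.Chars.splitOn.go ['<'] (n+1) [] cur acc = (cur.reverse :: acc).reverse := by
  simp [PySem.Chars.splitOn.go]

theorem splitOn_go_cons (n : Nat) (c : Char) (t cur : List Char) (acc : List (List Char)) :
    PySem.Chars.splitOn.go ['<'] (n+1) (c :: t) cur acc =
      if c = '<' then PySem.Chars.splitOn.go ['<'] n t [] (cur.reverse :: acc)
      else PySem.Chars.splitOn.go ['<'] n t (c :: cur) acc := by
  simp only [PySem.Chars.splitOn.go, List.isPrefixOf_cons₂, List.isPrefixOf_nil_left,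
    Bool.and_true, beq_iff_eq, List.length_cons, List.length_nil, Nat.zero_add, List.drop_one,
    List.tail_cons]
  by_cases hc : c = '<' <;> simp [hc, eq_comm]

-- replace(' ', '') is filter (· ≠ ' ')
theorem replace_go_filter (fuel : Nat) (l acc : List Char) (h : l.length ≤ fuel) :
    PySem.Chars.replace.go [' '] [] fuel l acc = acc.reverse ++ l.filter (· ≠ ' ') := by
  induction fuel generalizing l acc with
  | zero =>
    have hl : l = [] := by
      rw [← List.length_eq_zero_iff]; omega
    subst hl; rfl
  | succ n ih =>
    cases l with
    | nil => rw [replace_go_nil]; simp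
    | cons c t =>
      have ht : t.length ≤ n := by simpa using h
      rw [replace_go_cons]
      by_cases hc : c = ' '
      · subst hc
        rw [if_pos rfl, ih t acc ht]
        simp
      · rw [if_neg hc, ih t (c :: acc) ht]
        simp [hc]

theorem replace_filter (l : List Char) :
    PySem.Chars.replace l [' '] [] = l.filter (· ≠ ' ') := by
  rw [PySem.Chars.replace]
  simpa using replace_go_filter l.length l [] le_rfl

-- the first piece of split('<') is the prefix before the first '<'
theorem splitOn_go_first (fuel : Nat) (l cur : List Char) (acc : List (List Char))
    (h : l.length < fuel) :
    ∃ tail, PySem.Chars.splitOn.go ['<'] fuel l cur acc =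
      acc.reverse ++ (cur.reverse ++ l.takeWhile (· ≠ '<')) :: tail := by
  induction fuel generalizing l cur acc with
  | zero => omega
  | succ n ih =>
    cases l with
    | nil => exact ⟨[], by rw [splitOn_go_nil]; simp⟩
    | cons c t =>
      have ht : t.length < n := by simpa using h
      rw [splitOn_go_cons]
      by_cases hc : c = '<'
      · subst hc
        rw [if_pos rfl]
        obtain ⟨tl, htl⟩ := ih t [] (cur.reverse :: acc) ht
        refine ⟨t.takeWhile (· ≠ '<') :: tl, ?_⟩
        rw [htl]
        simp
      · rw [if_neg hc]
        obtain ⟨tl, htl⟩ := ih t (c :: cur) acc ht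
        refine ⟨tl, ?_⟩
        rw [htl]
        simp [hc]

theorem splitOn_first (l : List Char) :
    ∃ tail, PySem.Chars.splitOn l ['<'] = l.takeWhile (· ≠ '<') :: tail := by
  rw [PySem.Chars.splitOn]
  simpa using splitOn_go_first (l.length + 1) l [] [] (by omega)

-- B's text, on the char level
theorem text_eq (line : String) :
    PySem.Str.replace (((PySem.List.pyGet? ((PySem.Str.split? line "<").getD []) 0)).getD "") " " ""
      = String.ofList ((line.toList.takeWhile (· ≠ '<')).filter (· ≠ ' ')) := by
  obtain ⟨tail, htail⟩ := splitOn_first line.toList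
  have hsplit : PySem.Str.split? line "<" =
      some ((PySem.Chars.splitOn line.toList ['<']).map String.ofList) := by
    simp [PySem.Str.split?, PySem.Chars.split?]
  rw [hsplit, htail]
  simp only [Option.getD_some, List.map_cons, PySem.List.pyGet?, PySem.List.pyIdx?]
  norm_num
  rw [PySem.Str.replace]
  simp [replace_filter]

-- ===== VERDICT (by name: the statement is the Claim_ definition above) =====
theorem get_game_data_spec : Claim_equal_get_game_data := by
  intro linhas game i _hdom hpre
  obtain ⟨hsome, hkey⟩ := hpre
  unfold Spec_get_game_data get_game_data get_game_data_alt
  cases hline : PySem.List.pyGet? linhas (i + 7) with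
  | none => rfl
  | some line =>
    simp only []
    rw [foldl_stepA_true, applyChars_eq, text_eq]
    by_cases h : (line.toList.takeWhile (· ≠ '<')).filter (· ≠ ' ') = []
    · rw [if_pos h, h]
      rw [if_pos (by rfl)]
    · have hne : String.ofList ((line.toList.takeWhile (· ≠ '<')).filter (· ≠ ' ')) ≠ "" := by
        intro hx
        exact h (by simpa using congrArg String.toList hx)
      rw [if_neg h, if_neg hne]
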